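-- pv_equiv track=rewrite | github.com/SunkSchematic0006/jeffery_423_2024_spring | target/423/107-ucode/statistics107.py | every_other_odd
-- ===== SOURCE A (Python) =====
-- def every_other_odd(elements):
--     skipperino = []
--     j = 1
--     for i in range(len(elements)):
--         if elements[i]%2 == 0:
--             i = i + 1
--         else:
--             if j % 2 == 0:
--                 i = i + 1
--                 j = j + 1
--             else:
--                 skipperino.append(elements[i])
--                 i = i + 1
--                 j = j + 1
--     return skipperino
-- ===== SOURCE B (Python) =====
-- def every_other_odd(elements):
--     odds = [x for x in elements if x % 2 != 0]
--     return [x for k, x in enumerate(odds) if k % 2 == 0]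
-- ===== Notes on version B (the rewrite author's own statement) =====
-- stated objective: simpler
-- what changed: Replaces the single loop that threads a parity counter j with a two-phase decomposition: filter the odd elements first, then keep those at even positions of that filtered list.
import Mathlib
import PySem

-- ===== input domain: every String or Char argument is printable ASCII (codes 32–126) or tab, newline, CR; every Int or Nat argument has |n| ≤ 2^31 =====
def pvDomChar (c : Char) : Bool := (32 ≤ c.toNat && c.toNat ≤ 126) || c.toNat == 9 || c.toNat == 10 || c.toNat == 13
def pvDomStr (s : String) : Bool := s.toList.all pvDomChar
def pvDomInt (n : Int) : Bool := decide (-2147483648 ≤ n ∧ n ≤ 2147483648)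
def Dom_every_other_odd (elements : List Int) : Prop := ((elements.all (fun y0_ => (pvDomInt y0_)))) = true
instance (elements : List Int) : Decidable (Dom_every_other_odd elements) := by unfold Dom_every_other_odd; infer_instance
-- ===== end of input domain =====

-- B replaces A's single loop with a threaded parity counter j by a two-phase
-- decomposition: filter the odd elements, then keep the even positions of that list.

-- ===== PORT A =====
-- loop over range(len(elements)) with state (skipperino, j); the reassignments of i are dead code
def every_other_odd (elements : List Int) : List Int :=
  ((PySem.List.pyRange 0 elements.length 1).foldl
    (fun (s : List Int × Int) i =>
      let x := PySem.List.pyGetD elements i 0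
      if PySem.Int.mod x 2 == 0 then s
      else if PySem.Int.mod s.2 2 == 0 then (s.1, s.2 + 1)
      else (s.1 ++ [x], s.2 + 1)) ([], 1)).1

-- ===== PORT B =====
def every_other_odd_alt (elements : List Int) : List Int :=
  let odds := elements.filter (fun x => PySem.Int.mod x 2 != 0)
  ((PySem.List.enumerate odds 0).filter (fun p => PySem.Int.mod p.1 2 == 0)).map (·.2)

-- ===== PRECONDITION & SPEC =====
def Spec_every_other_odd (elements : List Int) (out : List Int) : Prop := out = every_other_odd_alt elements
instance (elements : List Int) (out : List Int) : Decidable (Spec_every_other_odd elements out) := by unfold Spec_every_other_odd; infer_instance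

-- ===== CLAIM (what is proved, stated in full; the proofs are below) =====
def Claim_equal_every_other_odd : Prop := ∀ (elements : List Int), Dom_every_other_odd elements → Spec_every_other_odd elements (every_other_odd elements)

-- ===== LEMMAS AND PROOFS =====

-- the loop body of A's port, named for the proofs
def stepA (s : List Int × Int) (x : Int) : List Int × Int :=
  if PySem.Int.mod x 2 == 0 then s
  else if PySem.Int.mod s.2 2 == 0 then (s.1, s.2 + 1)
  else (s.1 ++ [x], s.2 + 1)

-- keep every other element, starting with the head iff the flag is true
def altSel : Bool → List Int → List Int
  | _, [] => []
  | b, x :: xs => if b then x :: altSel false xs else altSel true xs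

theorem modE (a : Int) : PySem.Int.mod a 2 = a % 2 :=
  PySem.Int.mod_eq_emod_of_pos (by norm_num)

theorem getRange (xs : List Int) :
    (PySem.List.pyRange 0 (xs.length : Int) 1).map (fun i => PySem.List.pyGetD xs i 0) = xs := by
  simpa [PySem.List.len] using PySem.List.map_pyGetD_pyRange_zero (xs := xs) (d := 0)

theorem alt_enumerate (odds : List Int) : ∀ (s : Int),
    ((PySem.List.enumerate odds s).filter (fun p => PySem.Int.mod p.1 2 == 0)).map (·.2)
      = altSel (PySem.Int.mod s 2 == 0) odds := by
  induction odds with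
  | nil => intro s; simp [altSel]
  | cons x xs ih =>
    intro s
    rw [PySem.List.enumerate_cons]
    by_cases h : (PySem.Int.mod s 2 == 0) = true
    · have hs0 : s % 2 = 0 := by rw [modE] at h; exact beq_iff_eq.mp h
      have hd : (2 : Int) ∣ s := by omega
      have e : (s + 1) % 2 = 1 := by omega
      have ih' := ih (s + 1)
      simp only [modE, e] at ih'
      simp [List.filter_cons, modE, hd, altSel, ih']
    · have hs1 : s % 2 = 1 := by rw [modE] at h; simp at h; omega
      have hd : ¬ (2 : Int) ∣ s := by omega
      have e : (s + 1) % 2 = 0 := by omega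
      have ih' := ih (s + 1)
      simp only [modE, e] at ih'
      simp [List.filter_cons, modE, hd, altSel, ih']

theorem foldA (xs : List Int) : ∀ (acc : List Int) (j : Int),
    (xs.foldl stepA (acc, j)).1
      = acc ++ altSel (!(PySem.Int.mod j 2 == 0)) (xs.filter (fun x => PySem.Int.mod x 2 != 0)) := by
  induction xs with
  | nil => intro acc j; simp [altSel]
  | cons x xs ih =>
    intro acc j
    rw [List.foldl_cons]
    by_cases hx : (PySem.Int.mod x 2 == 0) = true
    · have hx0 : x % 2 = 0 := by rw [modE] at hx; exact beq_iff_eq.mp hx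
      have hdx : (2 : Int) ∣ x := by omega
      have hf : List.filter (fun x => PySem.Int.mod x 2 != 0) (x :: xs)
          = List.filter (fun x => PySem.Int.mod x 2 != 0) xs := by
        simp [List.filter_cons, modE, hdx]
      have hs : stepA (acc, j) x = (acc, j) := by simp [stepA, modE, hdx]
      rw [hs, hf]; exact ih acc j
    · have hx1 : x % 2 = 1 := by rw [modE] at hx; simp at hx; omega
      have hdx : ¬ (2 : Int) ∣ x := by omega
      have hf : List.filter (fun x => PySem.Int.mod x 2 != 0) (x :: xs)
          = x :: List.filter (fun x => PySem.Int.mod x 2 != 0) xs := by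
        simp [List.filter_cons, modE, hdx]
      by_cases hj : (PySem.Int.mod j 2 == 0) = true
      · have hj0 : j % 2 = 0 := by rw [modE] at hj; exact beq_iff_eq.mp hj
        have hdj : (2 : Int) ∣ j := by omega
        have hdj1 : ¬ (2 : Int) ∣ (j + 1) := by omega
        have hs : stepA (acc, j) x = (acc, j + 1) := by simp [stepA, modE, hdx, hdj]
        have ej : (j + 1) % 2 = 1 := by omega
        rw [hs, hf, ih acc (j + 1)]
        simp [altSel, modE, hdj, ej]
      · have hj1 : j % 2 = 1 := by rw [modE] at hj; simp at hj; omega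
        have hdj : ¬ (2 : Int) ∣ j := by omega
        have hdj1 : (2 : Int) ∣ (j + 1) := by omega
        have hs : stepA (acc, j) x = (acc ++ [x], j + 1) := by simp [stepA, modE, hdx, hdj]
        have ej : (j + 1) % 2 = 0 := by omega
        rw [hs, hf, ih (acc ++ [x]) (j + 1)]
        simp [altSel, modE, hdj, ej, hj1]

-- ===== VERDICT (by name: the statement is the Claim_ definition above) =====
theorem every_other_odd_spec : Claim_equal_every_other_odd := by
  intro elements _
  unfold Spec_every_other_odd every_other_odd every_other_odd_alt
  rw [show (fun (s : List Int × Int) i =>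
        let x := PySem.List.pyGetD elements i 0
        if PySem.Int.mod x 2 == 0 then s
        else if PySem.Int.mod s.2 2 == 0 then (s.1, s.2 + 1)
        else (s.1 ++ [x], s.2 + 1))
      = (fun s i => stepA s (PySem.List.pyGetD elements i 0)) from rfl]
  rw [show ((PySem.List.pyRange 0 (elements.length : Int) 1).foldl
        (fun s i => stepA s (PySem.List.pyGetD elements i 0)) (([] : List Int), (1 : Int)))
      = (((PySem.List.pyRange 0 (elements.length : Int) 1).map
          (fun i => PySem.List.pyGetD elements i 0)).foldl stepA (([] : List Int), (1 : Int)))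
    from List.foldl_map.symm]
  rw [getRange, foldA, alt_enumerate]
  have e1 : (!(PySem.Int.mod 1 2 == 0)) = true := by decide
  have e2 : (PySem.Int.mod 0 2 == 0) = true := by decide
  simp [e1]
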